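-- pv_equiv track=rewrite | github.com/yasinhessnawi1/Hideme_Backend | backend/app/utils/helpers/text_utils.py | reconstruct_text_and_mapping
-- ===== SOURCE A (Python) =====
-- from typing import Dict, List, Tuple, Any
--
-- def reconstruct_text_and_mapping(
--     words: List[Dict[str, Any]],
-- ) -> Tuple[str, List[Tuple[Dict[str, Any], int, int]]]:
--     """
--     Reconstructs the full text from a list of word dictionaries and builds a mapping
--     from each word to its start and end character offsets.
--
--     Args:
--         words: List of word dictionaries with text and position information.
--
--     Returns:
--         Tuple of (full_text, mapping)
--         - full_text: The complete text string.
--         - mapping: A list of tuples (word_dict, start_offset, end_offset).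
--     """
--     # Initialize a list to hold individual word texts.
--     word_texts = []
--     # Initialize a list to hold the mapping tuples.
--     mapping = []
--     # Set the starting character offset to 0.
--     current_offset = 0
--
--     # Loop over each word dictionary in the provided list.
--     for word in words:
--         # Retrieve the 'text' value from the word dictionary and strip whitespace.
--         text = word["text"].strip()
--         # Skip processing if the text is empty.
--         if not text:
--             continue  # Skip empty words.
--         # Append the cleaned text to the list of word texts.
--         word_texts.append(text)
--         # Record the starting offset for this word.
--         start = current_offset
--         # Calculate the ending offset for this word.
--         end = start + len(text)
--         # Append a tuple containing the word dictionary and its start and end offsets.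
--         mapping.append((word, start, end))
--         # Update the current offset: add the length of the word and one extra character for the space.
--         current_offset = end + 1
--
--     # Join all word texts with a space to form the full text.
--     full_text = " ".join(word_texts)
--     # Return the full text along with the mapping.
--     return full_text, mapping
-- ===== SOURCE B (Python) =====
-- def reconstruct_text_and_mapping(words):
--     # Keep (word, stripped_text) pairs for non-empty texts.
--     kept = []
--     for w in words:
--         t = w["text"].strip()
--         if t:
--             kept.append((w, t))
--     # The full text is one join.
--     full_text = " ".join(t for _, t in kept)
--     # Build the mapping BACK-TO-FRONT: walk the kept words in reverse,
--     # deriving each word's end offset as a suffix sum from len(full_text).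
--     mapping = []
--     end = len(full_text)
--     for w, t in reversed(kept):
--         mapping.append((w, end - len(t), end))
--         end -= len(t) + 1
--     mapping.reverse()
--     return full_text, mapping
-- ===== Notes on version B (the rewrite author's own statement) =====
-- stated objective: alternative
-- what changed: Instead of A's single forward pass accumulating a running start offset, B joins the stripped texts first and then derives the offsets back-to-front as suffix sums starting from len(full_text), reversing the built mapping at the end.
import Mathlib
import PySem

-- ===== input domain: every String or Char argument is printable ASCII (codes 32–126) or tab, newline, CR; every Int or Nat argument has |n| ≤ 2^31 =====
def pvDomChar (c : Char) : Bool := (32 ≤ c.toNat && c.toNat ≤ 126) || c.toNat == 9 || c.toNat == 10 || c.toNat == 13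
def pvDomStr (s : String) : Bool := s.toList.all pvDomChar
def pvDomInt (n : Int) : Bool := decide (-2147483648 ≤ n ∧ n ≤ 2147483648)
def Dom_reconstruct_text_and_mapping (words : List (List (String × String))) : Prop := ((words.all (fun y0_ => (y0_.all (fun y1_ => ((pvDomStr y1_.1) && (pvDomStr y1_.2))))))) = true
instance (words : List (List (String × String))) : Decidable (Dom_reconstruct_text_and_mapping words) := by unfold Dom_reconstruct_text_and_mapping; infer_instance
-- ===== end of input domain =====

-- B joins the stripped texts first and then derives the offsets back-to-front as suffix
-- sums from len(full_text) (objective: alternative traversal order, same cost).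

-- ===== PORT A =====
-- A: one forward loop carrying (word_texts, mapping, current_offset).
def reconstruct_text_and_mapping (words : List (List (String × String))) : String × (List ((List (String × String)) × Int × Int)) :=
  let st := words.foldl
    (fun (st : List String × List ((List (String × String)) × Int × Int) × Int) word =>
      let text := PySem.Str.strip (((PySem.Dict.mk word).get? "text").getD "")
      if text = "" then st
      else
        let start := st.2.2
        let e := start + PySem.Str.len text
        (st.1 ++ [text], st.2.1 ++ [(word, start, e)], e + 1))
    ([], [], 0)
  (PySem.Str.join " " st.1, st.2.1)

-- ===== PORT B =====
-- B: filter into kept pairs, one join, then a reversed loop of suffix sums from len(full_text).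
def reconstruct_text_and_mapping_alt (words : List (List (String × String))) : String × (List ((List (String × String)) × Int × Int)) :=
  let kept := words.foldl
    (fun (acc : List ((List (String × String)) × String)) w =>
      let t := PySem.Str.strip (((PySem.Dict.mk w).get? "text").getD "")
      if t = "" then acc else acc ++ [(w, t)]) []
  let full_text := PySem.Str.join " " (kept.map (fun p => p.2))
  let mapping := (kept.reverse.foldl
      (fun (p : List ((List (String × String)) × Int × Int) × Int) q =>
        (p.1 ++ [(q.1, p.2 - PySem.Str.len q.2, p.2)], p.2 - (PySem.Str.len q.2 + 1)))
      ([], PySem.Str.len full_text)).1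
  (full_text, mapping.reverse)

-- ===== PRECONDITION & SPEC =====
-- Pre_: every word dict has the key "text"; on a dict without it A raises KeyError.
def Pre_reconstruct_text_and_mapping (words : List (List (String × String))) : Prop :=
  ∀ w ∈ words, ((PySem.Dict.mk w).get? "text").isSome = true
instance (words : List (List (String × String))) : Decidable (Pre_reconstruct_text_and_mapping words) := by unfold Pre_reconstruct_text_and_mapping; infer_instance
def pvWitness_reconstruct_text_and_mapping : (List (List (String × String))) :=
  [[("text", " hi ")], [("text", "  ")], [("text", "world"), ("page", "1")]]

def Spec_reconstruct_text_and_mapping (words : List (List (String × String))) (out : String × (List ((List (String × String)) × Int × Int))) : Prop := out = reconstruct_text_and_mapping_alt words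
instance (words : List (List (String × String))) (out : String × (List ((List (String × String)) × Int × Int))) : Decidable (Spec_reconstruct_text_and_mapping words out) := by unfold Spec_reconstruct_text_and_mapping; infer_instance

-- ===== CLAIM (what is proved, stated in full; the proofs are below) =====
def Claim_equal_reconstruct_text_and_mapping : Prop := ∀ (words : List (List (String × String))), Dom_reconstruct_text_and_mapping words → Pre_reconstruct_text_and_mapping words → Spec_reconstruct_text_and_mapping words (reconstruct_text_and_mapping words)

-- ===== LEMMAS AND PROOFS =====

-- stripped "text" value of a word dict
def pvStx (w : List (String × String)) : String :=
  PySem.Str.strip (((PySem.Dict.mk w).get? "text").getD "")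

-- the filtered (word, stripped) pairs
def pvKept (ws : List (List (String × String))) : List ((List (String × String)) × String) :=
  ws.filterMap (fun w => if pvStx w = "" then none else some (w, pvStx w))

-- reference mapping built forward from offset c
def pvGo (ks : List ((List (String × String)) × String)) (c : Int) : List ((List (String × String)) × Int × Int) :=
  match ks with
  | [] => []
  | (w, t) :: r => (w, c, c + PySem.Str.len t) :: pvGo r (c + PySem.Str.len t + 1)

-- total length contribution (each word's length plus one separator)
def pvTot (ks : List ((List (String × String)) × String)) : Int :=
  match ks with
  | [] => 0
  | (_, t) :: r => PySem.Str.len t + 1 + pvTot r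

theorem pvFoldA_eq (ws : List (List (String × String)))
    (wt : List String) (mp : List ((List (String × String)) × Int × Int)) (c : Int) :
    ws.foldl
      (fun (st : List String × List ((List (String × String)) × Int × Int) × Int) word =>
        let text := PySem.Str.strip (((PySem.Dict.mk word).get? "text").getD "")
        if text = "" then st
        else
          let start := st.2.2
          let e := start + PySem.Str.len text
          (st.1 ++ [text], st.2.1 ++ [(word, start, e)], e + 1))
      (wt, mp, c)
    = (wt ++ (pvKept ws).map (fun p => p.2), mp ++ pvGo (pvKept ws) c, c + pvTot (pvKept ws)) := by
  induction ws generalizing wt mp c with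
  | nil => simp [pvKept, pvGo, pvTot]
  | cons w r ih =>
    by_cases h : pvStx w = ""
    · have hk : pvKept (w :: r) = pvKept r := by simp [pvKept, h]
      rw [List.foldl_cons, hk]
      simp only [pvStx] at h
      simp only [h, reduceIte]
      exact ih wt mp c
    · have hk : pvKept (w :: r) = (w, pvStx w) :: pvKept r := by simp [pvKept, h]
      rw [List.foldl_cons, hk]
      simp only [pvStx] at h
      simp only [if_neg h]
      rw [ih]
      simp [pvGo, pvTot, pvStx]
      ring

-- B's filter loop builds pvKept
theorem pvFoldK_eq (ws : List (List (String × String)))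
    (acc : List ((List (String × String)) × String)) :
    ws.foldl
      (fun (acc : List ((List (String × String)) × String)) w =>
        let t := PySem.Str.strip (((PySem.Dict.mk w).get? "text").getD "")
        if t = "" then acc else acc ++ [(w, t)]) acc
    = acc ++ pvKept ws := by
  induction ws generalizing acc with
  | nil => simp [pvKept]
  | cons w r ih =>
    by_cases h : pvStx w = ""
    · have hk : pvKept (w :: r) = pvKept r := by simp [pvKept, h]
      simp only [pvStx] at h
      simp only [List.foldl_cons, h, reduceIte, hk]
      exact ih acc
    · have hk : pvKept (w :: r) = (w, pvStx w) :: pvKept r := by simp [pvKept, h]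
      simp only [pvStx] at h
      simp only [List.foldl_cons, if_neg h, hk]
      rw [ih]
      simp [pvStx]

-- length of the space-join of a nonempty list of texts
theorem pvLenJoin (ks : List ((List (String × String)) × String)) (hne : ks ≠ []) :
    PySem.Str.len (PySem.Str.join " " (ks.map (fun p => p.2))) = pvTot ks - 1 := by
  induction ks with
  | nil => simp at hne
  | cons k r ih =>
    cases r with
    | nil =>
      rw [PySem.Str.len_eq, PySem.Str.toList_join]
      simp [PySem.Chars.join, List.intercalate, pvTot, PySem.Str.len_eq]
    | cons k2 r2 =>
      have h2 : PySem.Str.len (PySem.Str.join " " ((k2 :: r2).map (fun p => p.2))) = pvTot (k2 :: r2) - 1 :=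
        ih (by simp)
      rw [PySem.Str.len_eq, PySem.Str.toList_join] at h2 ⊢
      have hint : List.intersperse " ".toList (k.2.toList :: k2.2.toList :: (r2.map (fun p => p.2)).map String.toList)
          = k.2.toList :: " ".toList :: List.intersperse " ".toList (k2.2.toList :: (r2.map (fun p => p.2)).map String.toList) := by
        simp [List.intersperse]
      simp only [List.map_cons, PySem.Chars.join, List.intercalate, hint,
        List.flatten_cons, List.length_append, List.length_cons] at h2 ⊢
      simp only [List.map_cons, pvTot, PySem.Str.len_eq] at h2 ⊢
      simp only [List.map_map] at h2 ⊢
      have hsp2 : (" ".toList) = [' '] := by decide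
      simp only [hsp2, List.length_cons, List.length_nil] at h2 ⊢
      push_cast
      omega

-- backward fold from c + pvTot ks - 1 produces the forward mapping reversed
theorem pvFoldB_eq (ks : List ((List (String × String)) × String))
    (acc : List ((List (String × String)) × Int × Int)) (c : Int) :
    ks.reverse.foldl
      (fun (p : List ((List (String × String)) × Int × Int) × Int) q =>
        (p.1 ++ [(q.1, p.2 - PySem.Str.len q.2, p.2)], p.2 - (PySem.Str.len q.2 + 1)))
      (acc, c + pvTot ks - 1)
    = (acc ++ (pvGo ks c).reverse, c - 1) := by
  induction ks generalizing acc c with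
  | nil => simp [pvTot, pvGo]
  | cons k r ih =>
    cases k with
    | mk w t =>
      have : (((w, t) :: r).reverse) = r.reverse ++ [(w, t)] := by simp
      rw [this, List.foldl_append]
      have e1 : c + pvTot ((w, t) :: r) - 1 = (c + PySem.Str.len t + 1) + pvTot r - 1 := by
        simp [pvTot]; ring
      rw [e1, ih acc (c + PySem.Str.len t + 1)]
      simp [pvGo]
      omega

-- ===== VERDICT (by name: the statement is the Claim_ definition above) =====
theorem reconstruct_text_and_mapping_spec : Claim_equal_reconstruct_text_and_mapping := by
  intro words _ _
  unfold Spec_reconstruct_text_and_mapping reconstruct_text_and_mapping reconstruct_text_and_mapping_alt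
  simp only [pvFoldA_eq words [] [] 0, pvFoldK_eq words [], List.nil_append]
  by_cases hne : pvKept words = []
  · simp [hne, pvGo]
  · rw [pvLenJoin _ hne]
    have := pvFoldB_eq (pvKept words) [] 0
    simp only [zero_add] at this
    rw [this]
    simp
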